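-- pv_equiv track=rewrite | github.com/KendrickAng/competitive-programming | kattis/smallerstrings/smallerstrings2.py | count2
-- ===== SOURCE A (Python) =====
-- BIG = 1000000007
--
-- def get_tmp(c, k):
--     tmp = ord(c)-ord('a')+1
--     if k < tmp:
--         return k
--     elif k > tmp:
--         return tmp-1
--     else:
--         return k - 1
--
-- def count2(s, k, idx, isLimiterOff, sofar):
--     if len(s) % 2 != 0 and idx > len(s) // 2:
--         return sofar
--     if len(s) % 2 == 0 and idx >= len(s) // 2:
--         return sofar
--
--     if isLimiterOff:
--         return count2(s, k, idx+1, True, sofar * (k % BIG))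
--     else:
--         # tmp = min(k-1, min(ord(s[idx]), ord(s[-(idx+1)])) - ord('a'))
--         tmp = get_tmp(s[idx], k)
--         return count2(s, k, idx+1, False, sofar * (1 % BIG))\
--          + count2(s, k, idx+1, True, sofar* (tmp % BIG))
-- ===== SOURCE B (Python) =====
-- BIG = 1000000007
--
-- def get_tmp(c, k):
--     tmp = ord(c) - ord('a') + 1
--     if k < tmp:
--         return k
--     elif k > tmp:
--         return tmp - 1
--     else:
--         return k - 1
--
-- def count2(s, k, idx, isLimiterOff, sofar):
--     # Closed form of the recursion, single forward pass (Horner scheme).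
--     limit = (len(s) + 1) // 2
--     if idx >= limit:
--         return sofar
--     p = k % BIG
--     if isLimiterOff:
--         return sofar * p ** (limit - idx)
--     acc = 0
--     for i in range(idx, limit):
--         acc = acc * p + get_tmp(s[i], k) % BIG
--     return sofar * (1 + acc)
-- ===== Notes on version B (the rewrite author's own statement) =====
-- stated objective: alternative
-- what changed: Replaces A's branching recursion (which re-walks the limiter-off suffix for every position) by a non-recursive closed form: one forward Horner pass computing sofar*(1 + sum tmp(s[i])%BIG * (k%BIG)^(limit-1-i)), with the power folded into the Horner accumulator.
-- outside the precondition, e.g. on count2('ab', 3, -5, True, 1): A returns 729, B returns 729; on count2('ab', 3, -5, False, 1): A raises IndexError, B raises IndexError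
import Mathlib
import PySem

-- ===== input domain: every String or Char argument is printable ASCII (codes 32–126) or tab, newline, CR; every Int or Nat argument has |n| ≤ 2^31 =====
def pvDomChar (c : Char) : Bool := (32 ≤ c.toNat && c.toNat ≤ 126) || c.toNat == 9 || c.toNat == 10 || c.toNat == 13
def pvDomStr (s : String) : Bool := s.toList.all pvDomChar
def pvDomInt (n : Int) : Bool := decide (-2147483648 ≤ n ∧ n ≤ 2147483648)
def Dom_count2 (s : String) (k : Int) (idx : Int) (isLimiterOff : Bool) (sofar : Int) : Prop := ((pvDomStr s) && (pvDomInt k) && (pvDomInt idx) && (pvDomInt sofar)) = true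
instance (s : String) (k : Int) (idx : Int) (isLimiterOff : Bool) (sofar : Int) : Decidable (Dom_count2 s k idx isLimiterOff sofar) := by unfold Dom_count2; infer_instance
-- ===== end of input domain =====

-- B replaces A's branching recursion by its closed form: a single forward Horner
-- pass over the first half of the string (objective: alternative).

def BIG : Int := 1000000007

def get_tmp (c : Char) (k : Int) : Int :=
  let tmp : Int := (c.toNat : Int) - ('a'.toNat : Int) + 1
  if k < tmp then k
  else if k > tmp then tmp - 1
  else k - 1

-- ===== PORT A =====
-- literal transliteration of A's recursion, as structural recursion on a fuel
-- that bounds the recursion depth (len(s)//2 + 1 - idx, the measure that the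
-- Python recursion strictly decreases; at fuel 0 the guards already stop).
-- Where Python raises IndexError (s[idx] out of range, excluded by Pre_) the
-- port returns 0.
def count2go (s : String) (k : Int) : Nat → Int → Bool → Int → Int
  | 0, _, _, sofar => sofar
  | fuel + 1, idx, isLimiterOff, sofar =>
    if PySem.Int.mod (PySem.Str.len s) 2 ≠ 0 ∧ idx > PySem.Int.floordiv (PySem.Str.len s) 2 then sofar
    else if PySem.Int.mod (PySem.Str.len s) 2 = 0 ∧ idx ≥ PySem.Int.floordiv (PySem.Str.len s) 2 then sofar
    else if isLimiterOff then
      count2go s k fuel (idx + 1) true (sofar * PySem.Int.mod k BIG)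
    else
      match PySem.Str.pyGet? s idx with
      | none => 0
      | some c =>
        let tmp := get_tmp c k
        count2go s k fuel (idx + 1) false (sofar * PySem.Int.mod 1 BIG)
          + count2go s k fuel (idx + 1) true (sofar * PySem.Int.mod tmp BIG)

def count2 (s : String) (k : Int) (idx : Int) (isLimiterOff : Bool) (sofar : Int) : Int :=
  count2go s k (PySem.Int.floordiv (PySem.Str.len s) 2 + 1 - idx).toNat idx isLimiterOff sofar

-- ===== PORT B =====
def count2_alt (s : String) (k : Int) (idx : Int) (isLimiterOff : Bool) (sofar : Int) : Int :=
  let limit : Int := PySem.Int.floordiv (PySem.Str.len s + 1) 2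
  if idx ≥ limit then sofar
  else
    let p := PySem.Int.mod k BIG
    if isLimiterOff then sofar * p ^ (limit - idx).toNat
    else
      let acc := (PySem.List.pyRange idx limit 1).foldl
        (fun a i => a * p + PySem.Int.mod (get_tmp ((PySem.Str.pyGet? s i).getD ' ') k) BIG) 0
      sofar * (1 + acc)

-- ===== PRECONDITION & SPEC =====
-- Pre_ excludes idx below -len(s): there A's s[idx] raises IndexError on the
-- limiter-on path (and the limiter-off path only returns within Python's
-- recursion-depth limit, where B happens to agree).
def Pre_count2 (s : String) (k : Int) (idx : Int) (isLimiterOff : Bool) (sofar : Int) : Prop :=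
  -(PySem.Str.len s) ≤ idx
instance (s : String) (k : Int) (idx : Int) (isLimiterOff : Bool) (sofar : Int) : Decidable (Pre_count2 s k idx isLimiterOff sofar) := by unfold Pre_count2; infer_instance
def pvWitness_count2 : String × Int × Int × Bool × Int := ("abc", 5, 0, false, 1)

def Spec_count2 (s : String) (k : Int) (idx : Int) (isLimiterOff : Bool) (sofar : Int) (out : Int) : Prop := out = count2_alt s k idx isLimiterOff sofar
instance (s : String) (k : Int) (idx : Int) (isLimiterOff : Bool) (sofar : Int) (out : Int) : Decidable (Spec_count2 s k idx isLimiterOff sofar out) := by unfold Spec_count2; infer_instance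

-- ===== CLAIM (what is proved, stated in full; the proofs are below) =====
def Claim_equal_count2 : Prop := ∀ (s : String) (k : Int) (idx : Int) (isLimiterOff : Bool) (sofar : Int), Dom_count2 s k idx isLimiterOff sofar → Pre_count2 s k idx isLimiterOff sofar → Spec_count2 s k idx isLimiterOff sofar (count2 s k idx isLimiterOff sofar)


-- ===== LEMMAS AND PROOFS =====

theorem limit_le_iff (s : String) (idx : Int) :
    (PySem.Int.mod (PySem.Str.len s) 2 ≠ 0 ∧ idx > PySem.Int.floordiv (PySem.Str.len s) 2)
      ∨ (PySem.Int.mod (PySem.Str.len s) 2 = 0 ∧ idx ≥ PySem.Int.floordiv (PySem.Str.len s) 2)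
    ↔ PySem.Int.floordiv (PySem.Str.len s + 1) 2 ≤ idx := by
  rw [PySem.Int.mod_eq_emod_of_pos (by norm_num),
      PySem.Int.floordiv_eq_ediv_of_pos (a := PySem.Str.len s) (by norm_num),
      PySem.Int.floordiv_eq_ediv_of_pos (a := PySem.Str.len s + 1) (by norm_num)]
  simp only [PySem.Str.len_eq]
  omega

theorem limit_le_fdiv (s : String) :
    PySem.Int.floordiv (PySem.Str.len s + 1) 2 ≤ PySem.Int.floordiv (PySem.Str.len s) 2 + 1 := by
  rw [PySem.Int.floordiv_eq_ediv_of_pos (a := PySem.Str.len s + 1) (by norm_num),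
      PySem.Int.floordiv_eq_ediv_of_pos (a := PySem.Str.len s) (by norm_num)]
  simp only [PySem.Str.len_eq]
  omega

theorem count2_stop (s : String) (k idx sofar : Int) (off : Bool)
    (h : PySem.Int.floordiv (PySem.Str.len s + 1) 2 ≤ idx) :
    count2 s k idx off sofar = sofar := by
  unfold count2
  have hd := (limit_le_iff s idx).mpr h
  cases hn : (PySem.Int.floordiv (PySem.Str.len s) 2 + 1 - idx).toNat with
  | zero => rfl
  | succ n =>
    rw [count2go]
    split_ifs with h1 h2 <;> first | rfl | (exfalso; tauto)

theorem count2_true_step (s : String) (k idx sofar : Int)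
    (h : idx < PySem.Int.floordiv (PySem.Str.len s + 1) 2) :
    count2 s k idx true sofar = count2 s k (idx + 1) true (sofar * PySem.Int.mod k BIG) := by
  have hL := limit_le_fdiv s
  have hd := (limit_le_iff s idx).not.mpr (by omega)
  unfold count2
  have hm : (PySem.Int.floordiv (PySem.Str.len s) 2 + 1 - idx).toNat
      = (PySem.Int.floordiv (PySem.Str.len s) 2 + 1 - (idx + 1)).toNat + 1 := by omega
  rw [hm, count2go, if_neg (fun hc => hd (Or.inl hc)), if_neg (fun hc => hd (Or.inr hc)), if_pos rfl]

theorem count2_false_step (s : String) (k idx sofar : Int) (c : Char)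
    (h : idx < PySem.Int.floordiv (PySem.Str.len s + 1) 2)
    (hget : PySem.Str.pyGet? s idx = some c) :
    count2 s k idx false sofar
      = count2 s k (idx + 1) false (sofar * PySem.Int.mod 1 BIG)
        + count2 s k (idx + 1) true (sofar * PySem.Int.mod (get_tmp c k) BIG) := by
  have hL := limit_le_fdiv s
  have hd := (limit_le_iff s idx).not.mpr (by omega)
  unfold count2
  have hm : (PySem.Int.floordiv (PySem.Str.len s) 2 + 1 - idx).toNat
      = (PySem.Int.floordiv (PySem.Str.len s) 2 + 1 - (idx + 1)).toNat + 1 := by omega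
  rw [hm, count2go, if_neg (fun hc => hd (Or.inl hc)), if_neg (fun hc => hd (Or.inr hc)),
      if_neg (by simp), hget]

theorem horner_shift (p : Int) (g : Int → Int) :
    ∀ (l : List Int) (a : Int),
      l.foldl (fun acc i => acc * p + g i) a
        = a * p ^ l.length + l.foldl (fun acc i => acc * p + g i) 0 := by
  intro l
  induction l with
  | nil => intro a; simp
  | cons i l ih =>
    intro a
    simp only [List.foldl_cons, List.length_cons]
    rw [ih (a * p + g i), ih (0 * p + g i)]
    ring

theorem mod_one_BIG : PySem.Int.mod 1 BIG = 1 := by decide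

theorem in_range_some (s : String) (idx : Int)
    (h0 : -(PySem.Str.len s) ≤ idx)
    (h1 : idx < PySem.Int.floordiv (PySem.Str.len s + 1) 2) :
    ∃ c, PySem.Str.pyGet? s idx = some c := by
  have hlim : PySem.Int.floordiv (PySem.Str.len s + 1) 2 ≤ PySem.Str.len s := by
    rw [PySem.Int.floordiv_eq_ediv_of_pos (by norm_num)]
    simp only [PySem.Str.len_eq]
    omega
  rcases hc : PySem.Str.pyGet? s idx with _ | c
  · exfalso
    rw [PySem.Str.pyGet?_eq, PySem.Chars.pyGet?, PySem.List.pyGet?_eq_none_iff] at hc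
    apply hc
    constructor <;> simp only [PySem.Str.len_eq] at * <;> omega
  · exact ⟨c, rfl⟩

-- closed form of A's limiter-off chain: sofar * (k % BIG) ^ (steps remaining)
theorem count2_true_eq (s : String) (k : Int) :
    ∀ (n : Nat) (idx sofar : Int),
      (PySem.Int.floordiv (PySem.Str.len s + 1) 2 - idx).toNat = n →
      count2 s k idx true sofar = sofar * (PySem.Int.mod k BIG) ^ n := by
  intro n
  induction n with
  | zero =>
    intro idx sofar hn
    rw [count2_stop s k idx sofar true (by omega), pow_zero, mul_one]
  | succ n ih =>
    intro idx sofar hn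
    rw [count2_true_step s k idx sofar (by omega), ih (idx + 1) _ (by omega)]
    ring

-- closed form of A's limiter-on recursion: sofar * (1 + Horner sum over s[idx:limit])
theorem count2_false_eq (s : String) (k : Int) :
    ∀ (n : Nat) (idx sofar : Int),
      (PySem.Int.floordiv (PySem.Str.len s + 1) 2 - idx).toNat = n →
      -(PySem.Str.len s) ≤ idx →
      count2 s k idx false sofar
        = sofar * (1 + (PySem.List.pyRange idx (PySem.Int.floordiv (PySem.Str.len s + 1) 2) 1).foldl
            (fun a i => a * PySem.Int.mod k BIG
              + PySem.Int.mod (get_tmp ((PySem.Str.pyGet? s i).getD ' ') k) BIG) 0) := by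
  intro n
  induction n with
  | zero =>
    intro idx sofar hn _
    rw [count2_stop s k idx sofar false (by omega),
        PySem.List.pyRange_one_eq_nil (by omega)]
    simp
  | succ n ih =>
    intro idx sofar hn hlo
    have hlt : idx < PySem.Int.floordiv (PySem.Str.len s + 1) 2 := by omega
    obtain ⟨c, hget⟩ := in_range_some s idx hlo hlt
    rw [count2_false_step s k idx sofar c hlt hget,
        ih (idx + 1) _ (by omega) (by omega),
        count2_true_eq s k n (idx + 1) _ (by omega),
        PySem.List.pyRange_one_cons hlt]
    simp only [List.foldl_cons, hget, Option.getD_some]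
    rw [horner_shift (PySem.Int.mod k BIG)
          (fun i => PySem.Int.mod (get_tmp ((PySem.Str.pyGet? s i).getD ' ') k) BIG)
          (PySem.List.pyRange (idx + 1) (PySem.Int.floordiv (PySem.Str.len s + 1) 2) 1)
          (0 * PySem.Int.mod k BIG + PySem.Int.mod (get_tmp c k) BIG),
        mod_one_BIG, PySem.List.length_pyRange_one]
    have he : ((PySem.Int.floordiv (PySem.Str.len s + 1) 2 - (idx + 1)).toNat) = n := by omega
    rw [he]
    ring

-- ===== VERDICT (by name: the statement is the Claim_ definition above) =====
theorem count2_spec : Claim_equal_count2 := by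
  intro s k idx off sofar _hdom hpre
  have hpre' : -(PySem.Str.len s) ≤ idx := hpre
  unfold Spec_count2
  cases off
  · -- limiter on: Horner closed form
    rw [count2_false_eq s k _ idx sofar rfl hpre']
    simp only [count2_alt, Bool.false_eq_true, if_false]
    by_cases hl : idx ≥ PySem.Int.floordiv (PySem.Str.len s + 1) 2
    · rw [if_pos hl, PySem.List.pyRange_one_eq_nil (by omega)]
      simp
    · rw [if_neg hl]
  · -- limiter off: power closed form
    rw [count2_true_eq s k _ idx sofar rfl]
    simp only [count2_alt, if_true]
    by_cases hl : idx ≥ PySem.Int.floordiv (PySem.Str.len s + 1) 2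
    · rw [if_pos hl]
      have h0 : (PySem.Int.floordiv (PySem.Str.len s + 1) 2 - idx).toNat = 0 := by omega
      rw [h0, pow_zero, mul_one]
    · rw [if_neg hl]
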